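-- pv_equiv track=rewrite | github.com/business-factory/gold-digger | bears/PySortImportsBear.py | _get_imports_from_file
-- ===== SOURCE A (Python) =====
-- from enum import Enum
--
-- class ImportType(Enum):
--     DEFAULT = "default"
--     MULTI_LINE_SLASH = "multi_line_slash"
--     MULTI_LINE_PARENTHESIS = "multi_line_parenthesis"
--
-- def _get_imports_from_file(file):
--     """
--     Returns a list of lists of tuples containing imports from file.
--     Inner lists are import groups separated by lines not starting with from/import keyword.
--     Each tuple contains import itself, start line number of import and end line number
--
--     :type file: tuple
--     :rtype: list[list[tuple[str, int, int]]]
--     """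
--     imports = []
--     import_groups = [imports]
--     import_type = ImportType.DEFAULT
--     multi_line_import_start = 0
--     multi_line_import_parts = []
--
--     for line_number, line in enumerate(file, start=1):
--         line = line.strip()
--         if import_type == ImportType.DEFAULT:
--             if line.startswith(("from ", "import ")):
--                 if not line.endswith(("(", "\\")):
--                     imports.append((line, line_number, line_number))
--                     continue
--
--                 multi_line_import_parts.append(line[:-1].rstrip())
--                 multi_line_import_start = line_number
--                 import_type = ImportType.MULTI_LINE_PARENTHESIS if line.endswith("(") else ImportType.MULTI_LINE_SLASH
--             elif imports:
--                 imports = []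
--                 import_groups.append(imports)
--         else:
--             if import_type == ImportType.MULTI_LINE_PARENTHESIS and not line.endswith(")"):
--                 multi_line_import_parts.append(line)
--             elif import_type == ImportType.MULTI_LINE_SLASH and line.endswith("\\"):
--                 multi_line_import_parts.append(line[:-1].rstrip())
--             else:
--                 if import_type == ImportType.MULTI_LINE_PARENTHESIS:
--                     line = line[:-1].rstrip()
--
--                 multi_line_import_parts.append(line)
--                 imports.append((" ".join(p for p in multi_line_import_parts if p), multi_line_import_start, line_number))
--                 multi_line_import_parts = []
--                 import_type = ImportType.DEFAULT
--
--     return import_groups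
-- ===== SOURCE B (Python) =====
-- def _get_imports_from_file(file):
--     """Index-driven rewrite: outer loop over line indices, inner loops that
--     consume the continuation lines of a multi-line import in one go."""
--     groups = [[]]
--     n = len(file)
--     i = 0
--     while i < n:
--         line = file[i].strip()
--         if line.startswith(("from ", "import ")):
--             if not line.endswith(("(", "\\")):
--                 groups[-1].append((line, i + 1, i + 1))
--                 i += 1
--                 continue
--             start = i + 1
--             parts = [line[:-1].rstrip()]
--             paren = line.endswith("(")
--             j = i + 1
--             done = False
--             while j < n and not done:
--                 l = file[j].strip()
--                 if paren:
--                     if l.endswith(")"):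
--                         parts.append(l[:-1].rstrip())
--                         done = True
--                     else:
--                         parts.append(l)
--                 else:
--                     if l.endswith("\\"):
--                         parts.append(l[:-1].rstrip())
--                     else:
--                         parts.append(l)
--                         done = True
--                 j += 1
--             if done:
--                 groups[-1].append((" ".join(p for p in parts if p), start, j))
--             i = j
--         else:
--             if groups[-1]:
--                 groups.append([])
--             i += 1
--     return groups
-- ===== Notes on version B (the rewrite author's own statement) =====
-- stated objective: alternative
-- what changed: A's single pass with an explicit import-type state machine (DEFAULT/PAREN/SLASH carried across iterations) is replaced by an index-driven outer loop with no persistent state, which delegates each multi-line import to a dedicated inner loop that consumes its continuation lines in one go.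
import Mathlib
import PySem

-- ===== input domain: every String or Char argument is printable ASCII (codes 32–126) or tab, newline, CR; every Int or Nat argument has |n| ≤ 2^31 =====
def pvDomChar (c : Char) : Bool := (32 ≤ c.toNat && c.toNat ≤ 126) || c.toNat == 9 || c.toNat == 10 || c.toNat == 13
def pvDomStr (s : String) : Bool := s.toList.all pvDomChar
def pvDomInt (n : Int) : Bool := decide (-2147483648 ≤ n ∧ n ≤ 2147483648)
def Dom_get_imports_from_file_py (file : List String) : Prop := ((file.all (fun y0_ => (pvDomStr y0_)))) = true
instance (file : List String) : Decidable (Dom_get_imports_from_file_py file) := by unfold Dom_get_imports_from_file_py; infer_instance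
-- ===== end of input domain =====

-- B rewrites A's one-pass state machine as an index loop with inner consume loops; objective: alternative decomposition (same cost).

-- ===== PORT A =====
inductive PyImportTy
  | default | slash | paren
deriving DecidableEq, Repr

-- the for-loop of A, carrying the loop state (current group `cur`, finished groups `done`,
-- import_type `ty`, multi_line_import_start `start`, multi_line_import_parts `parts`)
def aLoop (xs : List String) (ln : Int) (ty : PyImportTy) (start : Int)
    (parts : List String) (cur : List (String × Int × Int))
    (done : List (List (String × Int × Int))) : List (List (String × Int × Int)) :=
  match xs with
  | [] => done ++ [cur]
  | l0 :: rest =>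
    let line := PySem.Str.strip l0
    if ty = PyImportTy.default then
      if PySem.Str.startswith line "from " || PySem.Str.startswith line "import " then
        if !(PySem.Str.endswith line "(" || PySem.Str.endswith line "\\") then
          aLoop rest (ln + 1) PyImportTy.default start parts (cur ++ [(line, ln, ln)]) done
        else
          aLoop rest (ln + 1)
            (if PySem.Str.endswith line "(" then PyImportTy.paren else PyImportTy.slash) ln
            (parts ++ [PySem.Str.rstrip (PySem.Str.slice line none (some (-1)))]) cur done
      else if cur ≠ [] then
        aLoop rest (ln + 1) PyImportTy.default start parts [] (done ++ [cur])
      else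
        aLoop rest (ln + 1) PyImportTy.default start parts cur done
    else
      if ty = PyImportTy.paren then
        if PySem.Str.endswith line ")" then
          aLoop rest (ln + 1) PyImportTy.default start []
            (cur ++ [(PySem.Str.join " "
                ((parts ++ [PySem.Str.rstrip (PySem.Str.slice line none (some (-1)))]).filter (· ≠ "")),
              start, ln)]) done
        else
          aLoop rest (ln + 1) ty start (parts ++ [line]) cur done
      else -- slash
        if PySem.Str.endswith line "\\" then
          aLoop rest (ln + 1) ty start
            (parts ++ [PySem.Str.rstrip (PySem.Str.slice line none (some (-1)))]) cur done
        else
          aLoop rest (ln + 1) PyImportTy.default start []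
            (cur ++ [(PySem.Str.join " " ((parts ++ [line]).filter (· ≠ "")), start, ln)]) done

def get_imports_from_file_py (file : List String) : List (List (String × Int × Int)) :=
  aLoop file 1 PyImportTy.default 0 [] [] []

-- ===== PORT B =====
-- inner while-loop of B: consume continuation lines of a multi-line import;
-- returns (some (parts, end line) if terminated, remaining lines, next line number)
def bConsume (paren : Bool) (xs : List String) (j : Int) (parts : List String) :
    Option (List String × Int) × List String × Int :=
  match xs with
  | [] => (none, [], j)
  | l0 :: rest =>
    let l := PySem.Str.strip l0
    if paren then
      if PySem.Str.endswith l ")" then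
        (some (parts ++ [PySem.Str.rstrip (PySem.Str.slice l none (some (-1)))], j), rest, j + 1)
      else
        bConsume paren rest (j + 1) (parts ++ [l])
    else
      if PySem.Str.endswith l "\\" then
        bConsume paren rest (j + 1) (parts ++ [PySem.Str.rstrip (PySem.Str.slice l none (some (-1)))])
      else
        (some (parts ++ [l], j), rest, j + 1)

-- needed for bGo's termination
theorem bConsume_length (paren : Bool) (xs : List String) (j : Int) (parts : List String) :
    (bConsume paren xs j parts).2.1.length ≤ xs.length := by
  induction xs generalizing j parts with
  | nil => simp [bConsume]
  | cons l0 rest ih =>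
    simp only [bConsume]
    split_ifs <;> simp <;> exact le_trans (ih _ _) (Nat.le_succ _)

-- outer while-loop of B
def bGo (xs : List String) (i : Int) (cur : List (String × Int × Int))
    (acc : List (List (String × Int × Int))) : List (List (String × Int × Int)) :=
  match xs with
  | [] => acc ++ [cur]
  | l0 :: rest =>
    let line := PySem.Str.strip l0
    if PySem.Str.startswith line "from " || PySem.Str.startswith line "import " then
      if !(PySem.Str.endswith line "(" || PySem.Str.endswith line "\\") then
        bGo rest (i + 1) (cur ++ [(line, i, i)]) acc
      else
        let r := bConsume (PySem.Str.endswith line "(") rest (i + 1)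
          [PySem.Str.rstrip (PySem.Str.slice line none (some (-1)))]
        match r.1 with
        | some (parts, endln) =>
          bGo r.2.1 r.2.2 (cur ++ [(PySem.Str.join " " (parts.filter (· ≠ "")), i, endln)]) acc
        | none => bGo r.2.1 r.2.2 cur acc
    else if cur ≠ [] then
      bGo rest (i + 1) [] (acc ++ [cur])
    else
      bGo rest (i + 1) cur acc
termination_by xs.length
decreasing_by
  · simp
  · exact Nat.lt_succ_of_le (bConsume_length _ _ _ _)
  · exact Nat.lt_succ_of_le (bConsume_length _ _ _ _)
  · simp
  · simp

def get_imports_from_file_py_alt (file : List String) : List (List (String × Int × Int)) :=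
  bGo file 1 [] []

-- ===== PRECONDITION & SPEC =====
def Spec_get_imports_from_file_py (file : List String) (out : List (List (String × Int × Int))) : Prop := out = get_imports_from_file_py_alt file
instance (file : List String) (out : List (List (String × Int × Int))) : Decidable (Spec_get_imports_from_file_py file out) := by unfold Spec_get_imports_from_file_py; infer_instance

-- ===== CLAIM (what is proved, stated in full; the proofs are below) =====
def Claim_equal_get_imports_from_file_py : Prop := ∀ (file : List String), Dom_get_imports_from_file_py file → Spec_get_imports_from_file_py file (get_imports_from_file_py file)

-- ===== LEMMAS AND PROOFS =====

-- what aLoop computes in a multi-line state, phrased through B's bConsume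
def contSpec (paren : Bool) (xs : List String) (ln start : Int) (parts : List String)
    (cur : List (String × Int × Int)) (acc : List (List (String × Int × Int))) :
    List (List (String × Int × Int)) :=
  match (bConsume paren xs ln parts).1 with
  | some (ps, e) =>
    bGo (bConsume paren xs ln parts).2.1 (bConsume paren xs ln parts).2.2
      (cur ++ [(PySem.Str.join " " (ps.filter (· ≠ "")), start, e)]) acc
  | none => acc ++ [cur]

theorem bConsume_none (paren : Bool) (xs : List String) (j : Int) (parts : List String)
    (h : (bConsume paren xs j parts).1 = none) : (bConsume paren xs j parts).2.1 = [] := by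
  induction xs generalizing j parts with
  | nil => simp [bConsume]
  | cons l0 rest ih =>
    simp only [bConsume] at h ⊢
    split_ifs at h ⊢ <;> first | simp at h | exact ih _ _ h

theorem contSpec_eq (paren : Bool) (xs : List String) (ln start : Int) (parts : List String)
    (cur : List (String × Int × Int)) (acc : List (List (String × Int × Int))) :
    contSpec paren xs ln start parts cur acc =
      match (bConsume paren xs ln parts).1 with
      | some (ps, e) =>
        bGo (bConsume paren xs ln parts).2.1 (bConsume paren xs ln parts).2.2
          (cur ++ [(PySem.Str.join " " (ps.filter (· ≠ "")), start, e)]) acc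
      | none => bGo (bConsume paren xs ln parts).2.1 (bConsume paren xs ln parts).2.2 cur acc := by
  unfold contSpec
  rcases hbc : (bConsume paren xs ln parts).1 with _ | ⟨ps, e⟩
  · rw [bConsume_none paren xs ln parts hbc]
    simp [bGo]
  · rfl

theorem aLoop_eq_bGo_aux (n : ℕ) : ∀ (xs : List String), xs.length ≤ n →
    (∀ ln start cur acc, aLoop xs ln PyImportTy.default start [] cur acc = bGo xs ln cur acc) ∧
    (∀ ln start parts cur acc, aLoop xs ln PyImportTy.paren start parts cur acc =
      contSpec true xs ln start parts cur acc) ∧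
    (∀ ln start parts cur acc, aLoop xs ln PyImportTy.slash start parts cur acc =
      contSpec false xs ln start parts cur acc) := by
  induction n with
  | zero =>
    intro xs hlen
    have hxs : xs = [] := List.length_eq_zero_iff.mp (Nat.le_zero.mp hlen)
    subst hxs
    refine ⟨fun ln start cur acc => by simp [aLoop, bGo], ?_, ?_⟩ <;>
      · intro ln start parts cur acc
        simp [aLoop, contSpec, bConsume]
  | succ n ih =>
    intro xs hlen
    match xs with
    | [] =>
      refine ⟨fun ln start cur acc => by simp [aLoop, bGo], ?_, ?_⟩ <;>
        · intro ln start parts cur acc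
          simp [aLoop, contSpec, bConsume]
    | l0 :: rest =>
      have hrest : rest.length ≤ n := by simpa using hlen
      obtain ⟨ihd, ihp, ihs⟩ := ih rest hrest
      refine ⟨?_, ?_, ?_⟩
      · -- default state
        intro ln start cur acc
        by_cases h1 : (PySem.Str.startswith (PySem.Str.strip l0) "from " ||
            PySem.Str.startswith (PySem.Str.strip l0) "import ") = true
        · by_cases h2 : (!(PySem.Str.endswith (PySem.Str.strip l0) "(" ||
              PySem.Str.endswith (PySem.Str.strip l0) "\\")) = true
          · simp at h1 h2; simp [aLoop, bGo, h1, h2, ihd]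
          · by_cases h3 : PySem.Str.endswith (PySem.Str.strip l0) "(" = true
            · simp at h1 h2 h3; simp [aLoop, bGo, h1, h3, ihp, contSpec_eq]
            · simp at h1 h2 h3; simp [aLoop, bGo, h1, h2, h3, ihs, contSpec_eq]
        · by_cases h4 : cur = []
          · simp at h1; simp [aLoop, bGo, h1, h4, ihd]
          · simp at h1; simp [aLoop, bGo, h1, h4, ihd]
      · -- paren state
        intro ln start parts cur acc
        by_cases h : PySem.Str.endswith (PySem.Str.strip l0) ")" = true
        · simp at h; simp [aLoop, contSpec, bConsume, h, ihd]
        · simp at h; simp [aLoop, contSpec, bConsume, h, ihp]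
      · -- slash state
        intro ln start parts cur acc
        by_cases h : PySem.Str.endswith (PySem.Str.strip l0) "\\" = true
        · simp at h; simp [aLoop, contSpec, bConsume, h, ihs]
        · simp at h; simp [aLoop, contSpec, bConsume, h, ihd]

-- ===== VERDICT (by name: the statement is the Claim_ definition above) =====
theorem get_imports_from_file_py_spec : Claim_equal_get_imports_from_file_py := by
  intro file _
  unfold Spec_get_imports_from_file_py get_imports_from_file_py get_imports_from_file_py_alt
  exact (aLoop_eq_bGo_aux file.length file (le_refl _)).1 1 0 [] []
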